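-- pv_equiv track=rewrite | github.com/Gihan-1994/WBTH | apps/ml/GuidesRecommendationModel/guide_recommender.py | _expertise_score
-- ===== SOURCE A (Python) =====
-- from typing import List, Dict, Optional, Set
--
-- def _expertise_score(guide_expertise: List[str], user_expertise: List[str]) -> int:
--     """
--     Calculate expertise match score.
--     +3 for any overlap
--     +1 per additional overlap, up to +5 total
--     """
--     if not user_expertise:
--         return 0
--
--     guide_exp = set(exp.lower() for exp in guide_expertise)
--     user_exp = set(exp.lower() for exp in user_expertise)
--
--     matches = len(guide_exp & user_exp)
--
--     if matches == 0:
--         return 0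
--
--     # +3 for first match, +1 for each additional, max +5
--     points = 3 + min(matches - 1, 2)
--     return points
-- ===== SOURCE B (Python) =====
-- def _dedupe_adjacent(ys):
--     """In a sorted list keep one element per run of equals: each element that
--     differs from its successor, plus the final element."""
--     return [y for y, nxt in zip(ys, ys[1:]) if y != nxt] + ys[-1:]
--
--
-- def _merge_count(g, u):
--     """Count common elements of two strictly increasing lists by a two-pointer
--     merge scan."""
--     i = j = n = 0
--     while i < len(g) and j < len(u):
--         if g[i] == u[j]:
--             n += 1
--             i += 1
--             j += 1
--         elif g[i] < u[j]:
--             i += 1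
--         else:
--             j += 1
--     return n
--
--
-- def _expertise_score(guide_expertise, user_expertise):
--     """Sort-merge instead of hashing: lowercase both lists, sort them, collapse
--     duplicates, then count the overlap with a two-pointer merge scan."""
--     if not user_expertise:
--         return 0
--     g = _dedupe_adjacent(sorted(e.lower() for e in guide_expertise))
--     u = _dedupe_adjacent(sorted(e.lower() for e in user_expertise))
--     matches = _merge_count(g, u)
--     if matches == 0:
--         return 0
--     return 3 + min(matches - 1, 2)
-- ===== Notes on version B (the rewrite author's own statement) =====
-- stated objective: alternative
-- what changed: Replaces A's hashed set construction and len(set & set) with a comparison-based pipeline: lowercase, sort each list, collapse adjacent duplicates, and count the overlap with a two-pointer merge scan over the two sorted lists.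
import Mathlib
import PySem

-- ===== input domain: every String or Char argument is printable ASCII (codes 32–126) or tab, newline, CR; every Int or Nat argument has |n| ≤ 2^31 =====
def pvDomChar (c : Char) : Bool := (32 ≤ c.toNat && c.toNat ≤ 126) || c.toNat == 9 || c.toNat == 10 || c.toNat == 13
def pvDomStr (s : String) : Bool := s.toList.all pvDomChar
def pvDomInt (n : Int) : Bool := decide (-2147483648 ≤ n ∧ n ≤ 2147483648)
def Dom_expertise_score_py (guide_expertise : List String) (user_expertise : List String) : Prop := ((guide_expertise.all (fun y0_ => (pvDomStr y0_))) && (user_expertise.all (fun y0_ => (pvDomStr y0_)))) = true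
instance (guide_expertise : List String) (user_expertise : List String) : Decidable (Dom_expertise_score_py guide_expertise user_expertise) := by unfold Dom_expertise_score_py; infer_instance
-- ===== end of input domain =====

-- B replaces A's hashed sets and len(set & set) by a comparison-based pipeline:
-- sort each lowered list, collapse adjacent duplicates, count the overlap with a
-- two-pointer merge scan (objective: alternative).

-- ===== PORT A =====
def expertise_score_py (guide_expertise : List String) (user_expertise : List String) : Int :=
  if user_expertise = [] then 0
  else
    let guide_exp : PySem.Set String := PySem.Set.ofList (guide_expertise.map PySem.Str.lower)
    let user_exp : PySem.Set String := PySem.Set.ofList (user_expertise.map PySem.Str.lower)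
    let m : Int := PySem.Set.len (PySem.Set.inter guide_exp user_exp)
    if m = 0 then 0 else 3 + min (m - 1) 2

-- ===== PORT B =====
-- _dedupe_adjacent: keep each element differing from its successor, plus the last
def pvDedup (ys : List String) : List String :=
  ((ys.zip (PySem.List.slice ys (some 1) none)).filterMap
    (fun p => if p.1 ≠ p.2 then some p.1 else none))
  ++ PySem.List.slice ys (some (-1)) none

-- _merge_count: while-loop with indices i, j and counter n
def pvMergeLoop (g u : List String) (i j n : Nat) : Nat :=
  if i < g.length ∧ j < u.length then
    if g.getD i "" = u.getD j "" then pvMergeLoop g u (i + 1) (j + 1) (n + 1)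
    else if g.getD i "" < u.getD j "" then pvMergeLoop g u (i + 1) j n
    else pvMergeLoop g u i (j + 1) n
  else n
termination_by (g.length - i) + (u.length - j)
decreasing_by all_goals omega

def expertise_score_py_alt (guide_expertise : List String) (user_expertise : List String) : Int :=
  if user_expertise = [] then 0
  else
    let g := pvDedup (PySem.List.sorted (guide_expertise.map PySem.Str.lower) (fun x => x) false)
    let u := pvDedup (PySem.List.sorted (user_expertise.map PySem.Str.lower) (fun x => x) false)
    let nmatches : Int := (pvMergeLoop g u 0 0 0 : Int)
    if nmatches = 0 then 0 else 3 + min (nmatches - 1) 2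

-- ===== PRECONDITION & SPEC =====
def Spec_expertise_score_py (guide_expertise : List String) (user_expertise : List String) (out : Int) : Prop := out = expertise_score_py_alt guide_expertise user_expertise
instance (guide_expertise : List String) (user_expertise : List String) (out : Int) : Decidable (Spec_expertise_score_py guide_expertise user_expertise out) := by unfold Spec_expertise_score_py; infer_instance

-- ===== CLAIM (what is proved, stated in full; the proofs are below) =====
def Claim_equal_expertise_score_py : Prop := ∀ (guide_expertise : List String) (user_expertise : List String), Dom_expertise_score_py guide_expertise user_expertise → Spec_expertise_score_py guide_expertise user_expertise (expertise_score_py guide_expertise user_expertise)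

-- ===== LEMMAS AND PROOFS =====

-- proof-only recursive forms of B's two loops
def pvDedupAdj : List String → List String
  | [] => []
  | [y] => [y]
  | y :: z :: t => if y = z then pvDedupAdj (z :: t) else y :: pvDedupAdj (z :: t)

def pvMergeCount : List String → List String → Nat
  | [], _ => 0
  | _ :: _, [] => 0
  | x :: g, y :: u =>
    if x = y then 1 + pvMergeCount g u
    else if x < y then pvMergeCount g (y :: u)
    else pvMergeCount (x :: g) u
termination_by g u => g.length + u.length

theorem pvDedup_eq (ys : List String) : pvDedup ys = pvDedupAdj ys := by
  fun_induction pvDedupAdj ys with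
  | case1 => rfl
  | case2 y => rfl
  | case3 z t ih =>
    rw [← ih]
    simp only [pvDedup, PySem.List.slice_from_one, List.tail_cons, List.zip_cons_cons,
      List.filterMap_cons, PySem.List.slice_from_neg_one]
    simp
  | case4 y z t hne ih =>
    rw [← ih]
    simp only [pvDedup, PySem.List.slice_from_one, List.tail_cons, List.zip_cons_cons,
      List.filterMap_cons, PySem.List.slice_from_neg_one]
    simp [hne]

theorem pvMergeLoop_eq (g u : List String) (i j n : Nat) :
    pvMergeLoop g u i j n = n + pvMergeCount (g.drop i) (u.drop j) := by
  fun_induction pvMergeLoop g u i j n with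
  | case1 i j n h hEq ih =>
    rw [ih, List.drop_eq_getElem_cons h.1, List.drop_eq_getElem_cons h.2,
      pvMergeCount, if_pos (by rwa [List.getD_eq_getElem _ _ h.1, List.getD_eq_getElem _ _ h.2] at hEq)]
    omega
  | case2 i j n h hNe hLt ih =>
    rw [ih, List.drop_eq_getElem_cons h.1, List.drop_eq_getElem_cons h.2, pvMergeCount,
      if_neg (by rwa [List.getD_eq_getElem _ _ h.1, List.getD_eq_getElem _ _ h.2] at hNe),
      if_pos (by rwa [List.getD_eq_getElem _ _ h.1, List.getD_eq_getElem _ _ h.2] at hLt),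
      ← List.drop_eq_getElem_cons h.2]
  | case3 i j n h hNe hLt ih =>
    rw [ih, List.drop_eq_getElem_cons h.1, List.drop_eq_getElem_cons h.2, pvMergeCount,
      if_neg (by rwa [List.getD_eq_getElem _ _ h.1, List.getD_eq_getElem _ _ h.2] at hNe),
      if_neg (by rwa [List.getD_eq_getElem _ _ h.1, List.getD_eq_getElem _ _ h.2] at hLt),
      ← List.drop_eq_getElem_cons h.1]
  | case4 i j n h =>
    have hnil : g.drop i = [] ∨ u.drop j = [] := by
      rcases not_and_or.mp h with h1 | h1
      · exact Or.inl (List.drop_eq_nil_of_le (by omega))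
      · exact Or.inr (List.drop_eq_nil_of_le (by omega))
    rcases hnil with h1 | h1 <;> rw [h1]
    · simp [pvMergeCount]
    · cases g.drop i <;> simp [pvMergeCount]

theorem pvMem_dedupAdj (x : String) (ys : List String) : x ∈ pvDedupAdj ys ↔ x ∈ ys := by
  fun_induction pvDedupAdj ys with
  | case1 => simp
  | case2 y => simp
  | case3 z t ih => rw [ih]; simp
  | case4 y z t hne ih => simp [ih]

theorem pvDedupAdj_pairwise (ys : List String) (h : ys.Pairwise (· ≤ ·)) :
    (pvDedupAdj ys).Pairwise (· < ·) := by
  fun_induction pvDedupAdj ys with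
  | case1 => simp
  | case2 y => simp
  | case3 z t ih => exact ih (List.pairwise_cons.mp h).2
  | case4 y z t hne ih =>
    obtain ⟨hy, hrest⟩ := List.pairwise_cons.mp h
    refine List.pairwise_cons.mpr ⟨?_, ih hrest⟩
    intro a ha
    have haz : a ∈ z :: t := (pvMem_dedupAdj a (z :: t)).mp ha
    have hya : y ≤ a := hy a haz
    rcases List.mem_cons.mp haz with rfl | hat
    · exact lt_of_le_of_ne hya hne
    · have hza : z ≤ a := (List.pairwise_cons.mp hrest).1 a hat
      have hyz : y ≤ z := hy z List.mem_cons_self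
      refine lt_of_le_of_ne hya (fun he => hne ?_)
      exact le_antisymm hyz (he ▸ hza)

theorem pvMergeCount_card (a b : List String) (ha : a.Pairwise (· < ·)) (hb : b.Pairwise (· < ·)) :
    pvMergeCount a b = (a.toFinset ∩ b.toFinset).card := by
  fun_induction pvMergeCount a b with
  | case1 b => simp
  | case2 x g => simp
  | case3 g x u ih =>
    have hxg : x ∉ g := fun hm => absurd ((List.pairwise_cons.mp ha).1 x hm) (lt_irrefl x)
    have hxu : x ∉ u := fun hm => absurd ((List.pairwise_cons.mp hb).1 x hm) (lt_irrefl x)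
    rw [ih (List.pairwise_cons.mp ha).2 (List.pairwise_cons.mp hb).2]
    have hset : (x :: g).toFinset ∩ (x :: u).toFinset = insert x (g.toFinset ∩ u.toFinset) := by
      ext w
      simp only [List.toFinset_cons, Finset.mem_inter, Finset.mem_insert, List.mem_toFinset]
      tauto
    rw [hset, Finset.card_insert_of_notMem (by simp [hxg, hxu])]
    omega
  | case4 x g y u hxy hlt ih =>
    have hxb : x ∉ (y :: u).toFinset := by
      intro hm
      rcases List.mem_cons.mp (List.mem_toFinset.mp hm) with rfl | hm2
      · exact hxy rfl
      · exact absurd (lt_trans hlt ((List.pairwise_cons.mp hb).1 x hm2)) (lt_irrefl x)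
    simp only [List.toFinset_cons] at hxb ⊢
    rw [ih (List.pairwise_cons.mp ha).2 hb, Finset.insert_inter_of_notMem hxb]
    simp only [List.toFinset_cons]
  | case5 x g y u hxy hlt ih =>
    have hyx : y < x := by
      rcases lt_trichotomy x y with h1 | h1 | h1
      · exact absurd h1 hlt
      · exact absurd h1 hxy
      · exact h1
    have hya : y ∉ (x :: g).toFinset := by
      intro hm
      rcases List.mem_cons.mp (List.mem_toFinset.mp hm) with rfl | hm2
      · exact hxy rfl
      · exact absurd (lt_trans hyx ((List.pairwise_cons.mp ha).1 y hm2)) (lt_irrefl y)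
    simp only [List.toFinset_cons] at hya ⊢
    rw [ih ha (List.pairwise_cons.mp hb).2, Finset.inter_insert_of_notMem hya]
    simp only [List.toFinset_cons]

-- the merge count over B's pipeline equals the Finset-intersection cardinality
theorem pvPipeline_card (gs us : List String) :
    pvMergeLoop (pvDedup (PySem.List.sorted gs (fun x => x) false))
        (pvDedup (PySem.List.sorted us (fun x => x) false)) 0 0 0
      = (gs.toFinset ∩ us.toFinset).card := by
  rw [pvMergeLoop_eq, List.drop_zero, List.drop_zero, Nat.zero_add, pvDedup_eq, pvDedup_eq]
  have hg := pvDedupAdj_pairwise _ (by simpa using PySem.List.sorted_pairwise gs (fun x => x))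
  have hu := pvDedupAdj_pairwise _ (by simpa using PySem.List.sorted_pairwise us (fun x => x))
  rw [pvMergeCount_card _ _ hg hu]
  have h1 : (pvDedupAdj (PySem.List.sorted gs (fun x => x) false)).toFinset = gs.toFinset := by
    ext w; simp [pvMem_dedupAdj, PySem.List.mem_sorted]
  have h2 : (pvDedupAdj (PySem.List.sorted us (fun x => x) false)).toFinset = us.toFinset := by
    ext w; simp [pvMem_dedupAdj, PySem.List.mem_sorted]
  rw [h1, h2]

-- A's intersection size as the same cardinality
theorem pvSetLen_card (gs us : List String) :
    PySem.Set.len (PySem.Set.inter (PySem.Set.ofList gs) (PySem.Set.ofList us))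
      = ((gs.toFinset ∩ us.toFinset).card : Int) := by
  set G : PySem.Set String := PySem.Set.ofList gs with hG
  set U : PySem.Set String := PySem.Set.ofList us with hU
  have h1 : PySem.Set.inter G U = G.filter (fun x => decide (x ∈ U.toFinset)) := by
    apply List.filter_congr
    intro x _
    simp [PySem.Set.contains, List.mem_toFinset]
  have h3 : (G.filter (fun x => decide (x ∈ U.toFinset))).Nodup :=
    List.Nodup.filter _ (PySem.Set.nodup_ofList _)
  have h2 : (G.filter (fun x => decide (x ∈ U.toFinset))).toFinset
      = G.toFinset.filter (fun x => x ∈ U.toFinset) := by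
    ext x; simp [List.mem_toFinset, Finset.mem_filter]
  have hGto : G.toFinset = gs.toFinset := by
    ext x; simp [hG, List.mem_toFinset, PySem.Set.mem_ofList]
  have hUto : U.toFinset = us.toFinset := by
    ext x; simp [hU, List.mem_toFinset, PySem.Set.mem_ofList]
  rw [PySem.Set.len, h1, ← List.toFinset_card_of_nodup h3, h2, Finset.filter_mem_eq_inter,
    hGto, hUto]

-- ===== VERDICT (by name: the statement is the Claim_ definition above) =====
theorem expertise_score_py_spec : Claim_equal_expertise_score_py := by
  intro g u _
  unfold Spec_expertise_score_py expertise_score_py expertise_score_py_alt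
  by_cases hu : u = []
  · simp [hu]
  · simp only [hu, if_false]
    rw [pvSetLen_card, pvPipeline_card]
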